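-- pv_equiv track=rewrite | github.com/huangyingw/submissions | 1714/1714.sum-of-special-evenly-spaced-elements-in-array.987192395.Runtime-Error.leetcode.python3.py | maxSumEvenlySpaced
-- ===== SOURCE A (Python) =====
-- def maxSumEvenlySpaced(nums, k):
--
--     n = len(nums)
--     max_sum = 0
--     result = []
--     for i in range(0, n - k + 1, k):
--         current_sum = 0
--         for j in range(i, i + k):
--             current_sum += nums[j]
--         max_sum = max(max_sum, current_sum)
--         result.append(max_sum)
--     return result
-- ===== SOURCE B (Python) =====
-- def maxSumEvenlySpaced(nums, k):
--     prefix = [0]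
--     for x in nums:
--         prefix.append(prefix[-1] + x)
--     m = max(0, len(nums) // k)
--     out = [0] * m
--     for t in range(m):
--         s = prefix[(t + 1) * k] - prefix[t * k]
--         prev = out[t - 1] if t else 0
--         out[t] = s if s > prev else prev
--     return out
-- ===== Notes on version B (the rewrite author's own statement) =====
-- stated objective: alternative
-- what changed: A fuses a stepped range, an inner per-block re-summation loop and a running-max accumulator; B precomputes a prefix-sum table so each block sum is one O(1) subtraction, derives the block count in closed form as max(0, n//k), and fills a preallocated output array by dynamic programming reading out[t-1] instead of carrying max_sum.
import Mathlib
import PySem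

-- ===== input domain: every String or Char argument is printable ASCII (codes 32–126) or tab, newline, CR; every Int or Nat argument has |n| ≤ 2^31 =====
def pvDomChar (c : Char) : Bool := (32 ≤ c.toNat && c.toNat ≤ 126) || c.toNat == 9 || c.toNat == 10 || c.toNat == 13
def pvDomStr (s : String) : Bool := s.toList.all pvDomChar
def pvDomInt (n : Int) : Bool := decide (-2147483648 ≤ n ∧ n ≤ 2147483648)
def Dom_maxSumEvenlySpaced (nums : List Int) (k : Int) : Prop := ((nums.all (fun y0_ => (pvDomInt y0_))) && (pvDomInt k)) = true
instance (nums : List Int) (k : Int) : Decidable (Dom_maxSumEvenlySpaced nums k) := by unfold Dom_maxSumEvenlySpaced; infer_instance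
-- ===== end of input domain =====

-- B replaces A's fused stepped loop (inner block re-summation + running-max accumulator) by a
-- prefix-sum table (each block sum one subtraction), a closed-form block count max(0, n//k),
-- and a DP fill of a preallocated output array reading out[t-1] (objective: alternative).

-- ===== PORT A =====
def maxSumEvenlySpaced (nums : List Int) (k : Int) : List Int :=
  let n : Int := (nums.length : Int)
  (List.foldl (fun (st : Int × List Int) i =>
      let current_sum : Int :=
        List.foldl (fun c j => c + PySem.List.pyGetD nums j 0) 0 (PySem.List.pyRange i (i + k) 1)
      let max_sum := max st.1 current_sum
      (max_sum, st.2 ++ [max_sum]))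
    (0, []) (PySem.List.pyRange 0 (n - k + 1) k)).2

-- ===== PORT B =====
-- Source B's first loop: prefix = [0]; for x in nums: prefix.append(prefix[-1] + x)
def pvPrefix (nums : List Int) : List Int :=
  nums.foldl (fun p x => p ++ [PySem.List.pyGetD p (-1) 0 + x]) [0]

def maxSumEvenlySpaced_alt (nums : List Int) (k : Int) : List Int :=
  let pfx := pvPrefix nums
  let m : Int := max 0 (PySem.Int.floordiv (nums.length : Int) k)
  let out0 : List Int := List.replicate m.toNat 0
  List.foldl (fun out t =>
      let s := PySem.List.pyGetD pfx ((t + 1) * k) 0 - PySem.List.pyGetD pfx (t * k) 0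
      let prev := if t ≠ 0 then PySem.List.pyGetD out (t - 1) 0 else 0
      PySem.List.pySetD out t (if s > prev then s else prev))
    out0 (PySem.List.pyRange 0 m 1)

-- ===== PRECONDITION & SPEC =====
-- Pre_ excludes only k = 0: there A raises ValueError (range step 0) and B raises ZeroDivisionError.
def Pre_maxSumEvenlySpaced (nums : List Int) (k : Int) : Prop := k ≠ 0
instance (nums : List Int) (k : Int) : Decidable (Pre_maxSumEvenlySpaced nums k) := by unfold Pre_maxSumEvenlySpaced; infer_instance
def pvWitness_maxSumEvenlySpaced : List Int × Int := ([1, 2, 3, 4], 2)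

def Spec_maxSumEvenlySpaced (nums : List Int) (k : Int) (out : List Int) : Prop := out = maxSumEvenlySpaced_alt nums k
instance (nums : List Int) (k : Int) (out : List Int) : Decidable (Spec_maxSumEvenlySpaced nums k out) := by unfold Spec_maxSumEvenlySpaced; infer_instance

-- ===== CLAIM (what is proved, stated in full; the proofs are below) =====
def Claim_equal_maxSumEvenlySpaced : Prop := ∀ (nums : List Int) (k : Int), Dom_maxSumEvenlySpaced nums k → Pre_maxSumEvenlySpaced nums k → Spec_maxSumEvenlySpaced nums k (maxSumEvenlySpaced nums k)

-- ===== LEMMAS AND PROOFS =====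

-- partial sums a+x1, a+x1+x2, … (proof-side characterisation of Source B's prefix list)
def pvSumsFrom (a : Int) : List Int → List Int
  | [] => []
  | x :: xs => (a + x) :: pvSumsFrom (a + x) xs

-- the common running-max list both loops produce: count, current best, current block index
def pvR (g : Int → Int) : Nat → Int → Int → List Int
  | 0, _, _ => []
  | c + 1, best, t => (max best (g t)) :: pvR g c (max best (g t)) (t + 1)

lemma pvPrefix_loop (xs : List Int) : ∀ (acc : List Int) (a : Int),
    List.foldl (fun p x => p ++ [PySem.List.pyGetD p (-1) 0 + x]) (acc ++ [a]) xs
      = acc ++ [a] ++ pvSumsFrom a xs := by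
  induction xs with
  | nil => intro acc a; simp [pvSumsFrom]
  | cons x xs ih =>
    intro acc a
    simp only [List.foldl_cons, PySem.List.pyGetD_neg_one_append_singleton, pvSumsFrom]
    have := ih (acc ++ [a]) (a + x)
    simpa using this

lemma pvPrefix_eq (nums : List Int) : pvPrefix nums = [0] ++ pvSumsFrom 0 nums := by
  have := pvPrefix_loop nums [] 0
  simpa [pvPrefix] using this

lemma pvSumsFrom_length (a : Int) (xs : List Int) : (pvSumsFrom a xs).length = xs.length := by
  induction xs generalizing a with
  | nil => rfl
  | cons x xs ih => simp [pvSumsFrom, ih]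

lemma pvSumsFrom_getElem (xs : List Int) : ∀ (a : Int) (j : Nat) (h : j < xs.length),
    (pvSumsFrom a xs)[j]'(by rw [pvSumsFrom_length]; exact h) = a + (xs.take (j + 1)).sum := by
  induction xs with
  | nil => intro a j h; simp at h
  | cons x xs ih =>
    intro a j h
    cases j with
    | zero => simp [pvSumsFrom]
    | succ j =>
      have hj : j < xs.length := by simpa using h
      have := ih (a + x) j hj
      simp [pvSumsFrom, this]
      ring

-- reading Source B's prefix table: prefix[j] = sum of the first j elements
lemma pvPrefix_get (nums : List Int) (j : Nat) (h : j ≤ nums.length) :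
    PySem.List.pyGetD (pvPrefix nums) ((j : Int)) 0 = (nums.take j).sum := by
  rw [PySem.List.pyGetD_natCast, pvPrefix_eq]
  cases j with
  | zero => simp
  | succ j =>
    have hj : j < nums.length := by omega
    have hlen : j + 1 < ([0] ++ pvSumsFrom 0 nums).length := by
      simp [pvSumsFrom_length]; omega
    rw [List.getD_eq_getElem _ _ hlen]
    have : ([0] ++ pvSumsFrom 0 nums)[j + 1]'hlen
        = (pvSumsFrom 0 nums)[j]'(by rw [pvSumsFrom_length]; exact hj) := by
      simp
    rw [this, pvSumsFrom_getElem nums 0 j hj]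
    ring

-- A's inner accumulation loop over indices [i, i+k) is the sum of that block
lemma pv_inner_sum (nums : List Int) (i k : Int) (h0 : 0 ≤ i) (hk : 0 < k)
    (hn : i + k ≤ (nums.length : Int)) :
    List.foldl (fun c j => c + PySem.List.pyGetD nums j 0) 0 (PySem.List.pyRange i (i + k) 1)
      = ((nums.drop i.toNat).take k.toNat).sum := by
  have h1 : (PySem.List.pyRange i (i + k) 1).map (fun j => PySem.List.pyGetD nums j 0)
      = (nums.drop i.toNat).take k.toNat := by
    rw [PySem.List.pyRange_one, List.map_map]
    apply List.ext_getElem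
    · simp; omega
    · intro m hm1 hm2
      simp only [List.getElem_map, List.getElem_range, Function.comp_apply,
        List.getElem_take, List.getElem_drop]
      have hmk : m < k.toNat := by simp at hm1; omega
      rw [PySem.List.pyGetD_eq_getElem nums 0 (by omega) (by omega)]
      congr 1
      omega
  rw [← h1, List.sum_eq_foldl, List.foldl_map]

lemma pv_block_sum (nums : List Int) (a K : Nat) (_h : a + K ≤ nums.length) :
    ((nums.drop a).take K).sum = (nums.take (a + K)).sum - (nums.take a).sum := by
  have hs : (nums.take (a + K)).sum = (nums.take a).sum + ((nums.drop a).take K).sum := by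
    rw [List.take_add, List.sum_append]
  omega

-- pyRange with a non-positive step and positive stop is empty (Python semantics)
lemma pvRange_nonpos_nil (b s : Int) (hs : s ≤ 0) (hb : 0 < b) : PySem.List.pyRange 0 b s = [] := by
  simp only [PySem.List.pyRange]
  split_ifs <;> first | rfl | omega

-- A's fused loop produces the running-max list pvR
lemma pvA_loop (g : Int → Int) (nums : List Int) (k : Int) :
    ∀ (c t : Nat) (best : Int) (acc : List Int),
    (∀ tt : Nat, tt < t + c →
      List.foldl (fun c j => c + PySem.List.pyGetD nums j 0)
        0 (PySem.List.pyRange ((tt : Int) * k) ((tt : Int) * k + k) 1) = g tt) →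
    (List.foldl (fun (st : Int × List Int) i =>
        let current_sum : Int :=
          List.foldl (fun c j => c + PySem.List.pyGetD nums j 0) 0 (PySem.List.pyRange i (i + k) 1)
        let max_sum := max st.1 current_sum
        (max_sum, st.2 ++ [max_sum]))
      (best, acc) ((List.range c).map (fun j : Nat => (((t + j : Nat)) : Int) * k))).2
      = acc ++ pvR g c best t := by
  intro c
  induction c with
  | zero => intro t best acc _; simp [pvR]
  | succ c ih =>
    intro t best acc hg
    rw [List.range_succ_eq_map, List.map_cons, List.map_map, List.foldl_cons]
    have hcs : List.foldl (fun c j => c + PySem.List.pyGetD nums j 0)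
        0 (PySem.List.pyRange ((((t + 0 : Nat)) : Int) * k) ((((t + 0 : Nat)) : Int) * k + k) 1)
          = g t := by
      have := hg t (by omega)
      simpa using this
    have hmap : (List.range c).map ((fun j : Nat => (((t + j : Nat)) : Int) * k) ∘ Nat.succ)
        = (List.range c).map (fun j : Nat => ((((t + 1) + j : Nat)) : Int) * k) := by
      apply List.map_congr_left
      intro j _
      have : t + Nat.succ j = (t + 1) + j := by omega
      simp [Function.comp, this]
    rw [hmap]
    have := ih (t + 1) (max best (g t)) (acc ++ [max best (g t)])
      (fun tt htt => hg tt (by omega))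
    dsimp only at this ⊢
    rw [hcs]
    rw [this]
    simp [pvR]

-- B's DP fill of the preallocated array produces the same running-max list pvR
lemma pvB_loop (g : Int → Int) (pfx : List Int) (k : Int)
    (hg : ∀ t : Int, 0 ≤ t →
      PySem.List.pyGetD pfx ((t + 1) * k) 0 - PySem.List.pyGetD pfx (t * k) 0 = g t) :
    ∀ (c : Nat) (acc : List Int) (best : Int),
    (acc = [] → best = 0) → (∀ h : acc ≠ [], acc.getLast h = best) →
    List.foldl (fun out t =>
        let s := PySem.List.pyGetD pfx ((t + 1) * k) 0 - PySem.List.pyGetD pfx (t * k) 0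
        let prev := if t ≠ 0 then PySem.List.pyGetD out (t - 1) 0 else 0
        PySem.List.pySetD out t (if s > prev then s else prev))
      (acc ++ List.replicate c 0)
      (PySem.List.pyRange (acc.length : Int) ((acc.length : Int) + (c : Int)) 1)
      = acc ++ pvR g c best (acc.length : Int) := by
  intro c
  induction c with
  | zero =>
    intro acc best _ _
    rw [PySem.List.pyRange_one_eq_nil (by omega)]
    simp [pvR]
  | succ c ih =>
    intro acc best hnil hlast
    rw [PySem.List.pyRange_one_cons (by push_cast; omega), List.foldl_cons]
    dsimp only
    have hprev : (if ((acc.length : Int) ≠ 0) then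
        PySem.List.pyGetD (acc ++ List.replicate (c + 1) 0) ((acc.length : Int) - 1) 0 else 0)
          = best := by
      by_cases hacc : acc = []
      · subst hacc; simp [hnil rfl]
      · have hlen : 0 < acc.length := List.length_pos_iff.mpr hacc
        rw [if_pos (by omega)]
        have h1 : ((acc.length : Int) - 1) = ((acc.length - 1 : Nat) : Int) := by omega
        rw [h1, PySem.List.pyGetD_natCast, List.getD_eq_getElem _ _ (by simp; omega)]
        rw [List.getElem_append_left (by omega)]
        rw [← List.getLast_eq_getElem hacc]
        exact hlast hacc
    rw [hprev]
    have hs := hg (acc.length : Int) (by positivity)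
    have hset : ∀ b : Int, PySem.List.pySetD (acc ++ List.replicate (c + 1) 0) (acc.length : Int) b
        = (acc ++ [b]) ++ List.replicate c 0 := by
      intro b
      rw [PySem.List.pySetD_natCast, List.replicate_succ]
      rw [show acc.length = acc.length + 0 from rfl, List.set_append_right _ _ (by omega)]
      simp
    have hmax : (if PySem.List.pyGetD pfx (((acc.length : Int) + 1) * k) 0
          - PySem.List.pyGetD pfx ((acc.length : Int) * k) 0 > best then
            PySem.List.pyGetD pfx (((acc.length : Int) + 1) * k) 0
              - PySem.List.pyGetD pfx ((acc.length : Int) * k) 0 else best)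
        = max best (g (acc.length : Int)) := by
      rw [hs]; split_ifs <;> omega
    rw [hmax, hset]
    have ihh := ih (acc ++ [max best (g (acc.length : Int))]) (max best (g (acc.length : Int)))
      (by simp) (by intro h; simp)
    have hlen2 : (((acc ++ [max best (g (acc.length : Int))]).length : Int))
        = (acc.length : Int) + 1 := by simp
    rw [hlen2] at ihh
    rw [show ((c + 1 : Nat) : Int) = (c : Int) + 1 by push_cast; ring,
        show (acc.length : Int) + ((c : Int) + 1) = ((acc.length : Int) + 1) + (c : Int) by ring,
        ihh]
    simp [pvR]

-- ===== VERDICT (by name: the statement is the Claim_ definition above) =====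
theorem maxSumEvenlySpaced_spec : Claim_equal_maxSumEvenlySpaced := by
  intro nums k _ hk
  unfold Spec_maxSumEvenlySpaced maxSumEvenlySpaced maxSumEvenlySpaced_alt
  dsimp only
  rcases lt_or_gt_of_ne hk with hneg | hpos
  · -- k < 0: both sides produce []
    have hA : PySem.List.pyRange 0 ((nums.length : Int) - k + 1) k = [] :=
      pvRange_nonpos_nil _ _ (le_of_lt hneg) (by omega)
    have hq : PySem.Int.floordiv (nums.length : Int) k ≤ 0 := by
      have h1 := PySem.Int.floordiv_mul_add_mod (nums.length : Int) k
      have h2 := PySem.Int.mod_neg_bounds (a := (nums.length : Int)) (b := k) hneg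
      nlinarith [h2.1, h2.2, Int.natCast_nonneg nums.length]
    have hm : max 0 (PySem.Int.floordiv (nums.length : Int) k) = 0 := by omega
    rw [hA, hm]
    simp
  · -- k > 0
    set n : Int := (nums.length : Int) with hn
    set g : Int → Int := fun t =>
      PySem.List.pyGetD (pvPrefix nums) ((t + 1) * k) 0
        - PySem.List.pyGetD (pvPrefix nums) (t * k) 0 with hgdef
    have hq := PySem.Int.floordiv_eq_ediv_of_pos (a := n) hpos
    have hq0 : 0 ≤ n / k := Int.ediv_nonneg (by positivity) (le_of_lt hpos)
    have hqk : (n / k) * k ≤ n := Int.ediv_mul_le n (by omega)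
    have hm : max 0 (PySem.Int.floordiv n k) = n / k := by rw [hq]; omega
    set M : Nat := (n / k).toNat with hM
    have hcast : n / k = (M : Int) := (Int.toNat_of_nonneg hq0).symm
    have hMk : (M : Int) * k ≤ n := by rw [← hcast]; exact hqk
    set K : Nat := k.toNat with hK
    have hkK : k = (K : Int) := by rw [hK]; omega
    have hKpos : 0 < K := by omega
    -- A's stepped range as a mapped List.range of length M
    have hA : PySem.List.pyRange 0 (n - k + 1) k
        = (List.range M).map (fun j : Nat => ((j : Nat) : Int) * k) := by
      rw [PySem.List.pyRange_of_pos 0 (n - k + 1) hpos]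
      have hcount : (if (0:Int) < n - k + 1 then ((n - k + 1 - 0 + k - 1) / k).toNat else 0) = M := by
        by_cases hnk : (0:Int) < n - k + 1
        · rw [if_pos hnk]
          have : n - k + 1 - 0 + k - 1 = n := by ring
          rw [this]
        · rw [if_neg hnk]
          have h0 : n / k = 0 := Int.ediv_eq_zero_of_lt (by positivity) (by omega)
          rw [hM, h0]; rfl
      rw [hcount]
      apply List.map_congr_left
      intro j _
      ring
    -- both loops compute g at block index tt
    have hgB : ∀ t : Int, 0 ≤ t →
        PySem.List.pyGetD (pvPrefix nums) ((t + 1) * k) 0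
          - PySem.List.pyGetD (pvPrefix nums) (t * k) 0 = g t := fun t _ => rfl
    have hgA : ∀ tt : Nat, tt < 0 + M →
        List.foldl (fun c j => c + PySem.List.pyGetD nums j 0)
          0 (PySem.List.pyRange ((tt : Int) * k) ((tt : Int) * k + k) 1) = g tt := by
      intro tt htt
      have htt' : tt + 1 ≤ M := by omega
      have hub : ((tt : Int) + 1) * k ≤ n := by
        have h1 : ((tt : Int) + 1) ≤ (M : Int) := by exact_mod_cast htt'
        nlinarith
      have hlb : (0 : Int) ≤ (tt : Int) * k := by positivity
      have hsum := pv_inner_sum nums ((tt : Int) * k) k hlb hpos (by nlinarith)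
      have ha : ((tt : Int) * k).toNat = tt * K := by
        rw [hkK, ← Nat.cast_mul, Int.toNat_natCast]
      have hlen : (tt + 1) * K ≤ nums.length := by
        have h1 : (((tt + 1) * K : Nat) : Int) = ((tt : Int) + 1) * k := by
          rw [hkK]; push_cast; ring
        have h2 : (((tt + 1) * K : Nat) : Int) ≤ ((nums.length : Int)) := by rw [h1]; exact hub
        exact_mod_cast h2
      rw [hsum, ha, hgdef]
      dsimp only
      have hb := pv_block_sum nums (tt * K) K (by rw [← Nat.succ_mul]; exact hlen)
      rw [hb]
      have e1 : ((tt : Int) + 1) * k = (((tt + 1) * K : Nat) : Int) := by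
        rw [hkK]; push_cast; ring
      have e2 : (tt : Int) * k = (((tt * K : Nat)) : Int) := by
        rw [hkK]; push_cast; ring
      rw [e1, e2, pvPrefix_get nums ((tt + 1) * K) hlen, pvPrefix_get nums (tt * K) (by nlinarith [hlen])]
      have : tt * K + K = (tt + 1) * K := by ring
      rw [this]
    have hAeq := pvA_loop g nums k M 0 0 [] hgA
    have hB := pvB_loop g (pvPrefix nums) k hgB M [] 0 (fun _ => rfl)
      (by intro h; exact absurd rfl h)
    simp only [List.nil_append, List.length_nil, Nat.cast_zero, zero_add] at hAeq hB
    rw [hA, hm, hcast, hAeq]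
    simp only [Int.toNat_natCast]
    exact hB.symm
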